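-- pv_equiv track=rewrite | github.com/chaosdevil/leetcode-problem-solving | graphs/circle_words_set.py | checkArrangement
-- ===== SOURCE A (Python) =====
-- CHAR_SIZE = 128
--
-- class Graph:
--     def __init__(self, N, edges=[]):
--         # resize the list to hold `N` elements
--         self.adj = [[] for _ in range(N)]
--
--         # add an edge from source to destination
--         for edge in edges:
--             self.addEdge(edge[0], edge[1])
--
--     # Function to add an edge `u —> v` to the graph
--     # and update in-degree for each edge
--     def addEdge(self, u, v):
--         self.adj[u].append(v)
--
-- def DFS(graph, v, discovered):
--     discovered[v] = True        # mark the current node as discovered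
--
--     # do for every edge `v —> u`
--     for u in graph.adj[v]:
--         if not discovered[u]:   # `u` is not discovered
--             DFS(graph, u, discovered)
--
-- def transpose(graph, N):
--     g = Graph(N)
--
--     # for every edge `u —> v`, create a reverse edge `v —> u`
--     for u in range(N):
--         for v in graph.adj[u]:
--             g.addEdge(v, u)
--
--     return g
--
-- def isdiscovered(graph, discovered):
--     for i in range(len(discovered)):
--         if len(graph.adj[i]) and not discovered[i]:
--             return False
--     return True
--
-- def isSC(graph, N):
--
--     # keep track of all previously discovered vertices
--     discovered = [False] * N
--
--     # start DFS from the first vertex `i` with a non-zero degree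
--     for i in range(N):
--         if len(graph.adj[i]):
--             DFS(graph, i, discovered)
--             break
--
--     # return false if DFS could not explore all non-isolated vertices
--     if not isdiscovered(graph, discovered):
--         return False
--
--     # reset the discovered vertices array for another DFS call
--     discovered[:] = [False] * N
--
--     # create a transpose graph with the direction of every edge reversed
--     g = transpose(graph, N)
--
--     # perform DFS on the transpose graph using the same starting vertex `i`
--     DFS(g, i, discovered)
--
--     # check if the second DFS also explored all non-isolated vertices
--     return isdiscovered(g, discovered)
--
-- def checkArrangement(words):
--
--     # create a directed graph with the same number of nodes as the alphabet size
--     graph = Graph(CHAR_SIZE)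
--
--     # create an empty array to store in-degree for each vertex
--     # assign in-degree 0 to each vertex
--     indegree = [0] * CHAR_SIZE
--
--     # process each word
--     for s in words:
--         src = ord(s[0])
--         dest = ord(s[-1])
--
--         # add an edge to the graph from the first character to the last character
--         graph.addEdge(src, dest)
--
--         # increment the in-degree of the destination vertex by 1
--         indegree[dest] += 1
--
--     '''
--         If the constructed graph has an Eulerian cycle, only then can the given words
--         be rearranged to form a circle
--     '''
--
--     # 1. Check if every vertex has the same in-degree and out-degree
--     for i in range(CHAR_SIZE):
--         if len(graph.adj[i]) != indegree[i]:
--             return False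
--
--     # 2. Check if all non-isolated vertices belong to a single
--     # strongly connected component
--     return isSC(graph, CHAR_SIZE)
-- ===== SOURCE B (Python) =====
-- # B: same edge construction and balance check, but strong connectivity tested with
-- # iterative BFS-style closures (forward and on a directly-built reverse graph)
-- # instead of Kosaraju's recursive double DFS.
-- CHAR_SIZE = 128
--
-- def checkArrangement(words):
--     edges = [(ord(s[0]), ord(s[-1])) for s in words]
--
--     adj = [[] for _ in range(CHAR_SIZE)]
--     indeg = [0] * CHAR_SIZE
--     for a, b in edges:
--         adj[a].append(b)
--         indeg[b] += 1
--
--     # Eulerian-cycle degree condition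
--     if any(len(adj[i]) != indeg[i] for i in range(CHAR_SIZE)):
--         return False
--
--     starts = [v for v in range(CHAR_SIZE) if adj[v]]
--     if not starts:
--         return True
--     i = starts[0]
--
--     radj = [[] for _ in range(CHAR_SIZE)]
--     for a, b in edges:
--         radj[b].append(a)
--
--     def closure(g, start):
--         # bounded fixed-point iteration: 128 rounds suffice on <= 128 vertices
--         seen = [False] * CHAR_SIZE
--         seen[start] = True
--         for _ in range(CHAR_SIZE):
--             new = seen[:]
--             for v in range(CHAR_SIZE):
--                 if seen[v]:
--                     for u in g[v]:
--                         new[u] = True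
--             seen = new
--         return seen
--
--     fwd = closure(adj, i)
--     bwd = closure(radj, i)
--     return all(fwd[v] and bwd[v] for v in starts)
-- ===== Notes on version B (the rewrite author's own statement) =====
-- stated objective: alternative
-- what changed: The Kosaraju-style strong-connectivity test (recursive DFS, explicit graph transposition by vertex scan, second recursive DFS) is replaced by two iterative BFS-style fixed-point closures over a seen-flag list (forward, and backward on a reverse-adjacency list built directly from the edge list), combined into a single all() over the non-isolated vertices.
import Mathlib
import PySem

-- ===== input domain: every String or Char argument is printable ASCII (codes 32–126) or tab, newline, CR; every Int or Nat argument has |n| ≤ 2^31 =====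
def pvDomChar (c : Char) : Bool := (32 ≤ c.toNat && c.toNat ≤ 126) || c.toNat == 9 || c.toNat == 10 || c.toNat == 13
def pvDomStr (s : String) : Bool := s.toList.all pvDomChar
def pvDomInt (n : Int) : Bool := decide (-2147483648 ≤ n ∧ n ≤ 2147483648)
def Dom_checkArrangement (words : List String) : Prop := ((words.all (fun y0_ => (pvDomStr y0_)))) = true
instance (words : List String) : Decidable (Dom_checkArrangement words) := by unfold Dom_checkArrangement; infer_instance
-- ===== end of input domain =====

-- B replaces Kosaraju's recursive double-DFS strong-connectivity test by bounded
-- fixed-point BFS closures on the graph and a directly built reverse graph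
-- (objective: alternative algorithm, similar cost).

-- ===== PORT A =====
-- shared low-level helpers: ord(s[i]) and `discovered[v] = True`
-- ordAt: ord(s[i]) via PySem.Str.pyGet?; Python raises IndexError on an empty word,
-- those inputs are excluded by Pre_checkArrangement (the `.getD ' '` default is never
-- reached inside Pre_).
def ordAt (s : String) (i : Int) : Nat := ((PySem.Str.pyGet? s i).getD ' ').toNat

def upd (d : Nat → Bool) (v : Nat) : Nat → Bool := fun x => if x = v then true else d x

-- the edge/in-degree build loop of checkArrangement (adjacency and indegree as functions)
def buildA (words : List String) : (Nat → List Nat) × (Nat → Nat) :=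
  words.foldl
    (fun g s =>
      ((fun x => if x = ordAt s 0 then g.1 x ++ [ordAt s (-1)] else g.1 x),
       (fun x => if x = ordAt s (-1) then g.2 x + 1 else g.2 x)))
    ((fun _ => []), (fun _ => 0))

-- recursive DFS of A; Python's recursion is depth-bounded by the 128 vertices, the
-- fuel 129 used below is proven sufficient in the lemmas (it is never exhausted).
mutual
def dfsA (g : Nat → List Nat) : Nat → Nat → (Nat → Bool) → (Nat → Bool)
  | 0, _, d => d
  | fuel+1, v, d => dfsLA g fuel (g v) (upd d v)
termination_by fuel _ _ => (fuel, 0)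
def dfsLA (g : Nat → List Nat) : Nat → List Nat → (Nat → Bool) → (Nat → Bool)
  | _, [], d => d
  | fuel, u :: rest, d => dfsLA g fuel rest (if d u then d else dfsA g fuel u d)
termination_by fuel l _ => (fuel, l.length + 1)
end

def transposeA (adj : Nat → List Nat) : Nat → List Nat :=
  (List.range 128).foldl
    (fun g u => (adj u).foldl (fun g v => fun x => if x = v then g x ++ [u] else g x) g)
    (fun _ => [])

def isdiscA (adj : Nat → List Nat) (disc : Nat → Bool) : Bool :=
  (List.range 128).all (fun i => (adj i).isEmpty || disc i)

def isSCA (adj : Nat → List Nat) : Bool :=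
  match (List.range 128).find? (fun v => !(adj v).isEmpty) with
  | some i =>
      let disc := dfsA adj 129 i (fun _ => false)
      if !(isdiscA adj disc) then false
      else
        let g := transposeA adj
        let disc2 := dfsA g 129 i (fun _ => false)
        isdiscA g disc2
  | none =>  -- Python's loop variable i ends at 127 when no vertex has out-degree
      let disc : Nat → Bool := fun _ => false
      if !(isdiscA adj disc) then false
      else
        let g := transposeA adj
        let disc2 := dfsA g 129 127 (fun _ => false)
        isdiscA g disc2

def checkArrangement (words : List String) : Bool :=
  let gi := buildA words
  if (List.range 128).all (fun i => (gi.1 i).length == gi.2 i) then isSCA gi.1 else false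

-- ===== PORT B =====
def edgesB (words : List String) : List (Nat × Nat) :=
  words.map (fun s => (ordAt s 0, ordAt s (-1)))

def adjB (es : List (Nat × Nat)) : Nat → List Nat :=
  es.foldl (fun a e => fun x => if x = e.1 then a x ++ [e.2] else a x) (fun _ => [])

def indegB (es : List (Nat × Nat)) : Nat → Nat :=
  es.foldl (fun a e => fun x => if x = e.2 then a x + 1 else a x) (fun _ => 0)

def radjB (es : List (Nat × Nat)) : Nat → List Nat :=
  es.foldl (fun a e => fun x => if x = e.2 then a x ++ [e.1] else a x) (fun _ => [])

-- one BFS round: new = seen plus every neighbour of a seen vertex (seen as a list of 128 flags)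
def markL (l : List Nat) (d : List Bool) : List Bool :=
  l.foldl (fun a u => a.set u true) d

def stepL (g : Nat → List Nat) (s : List Bool) : List Bool :=
  (List.range 128).foldl (fun acc v => if s.getD v false then markL (g v) acc else acc) s

def iterL (g : Nat → List Nat) : Nat → List Bool → List Bool
  | 0, s => s
  | n+1, s => iterL g n (stepL g s)

def closureL (g : Nat → List Nat) (start : Nat) : List Bool :=
  iterL g 128 ((List.replicate 128 false).set start true)

def checkArrangement_alt (words : List String) : Bool :=
  let es := edgesB words
  let adj := adjB es
  let indeg := indegB es
  if (List.range 128).any (fun i => !((adj i).length == indeg i)) then false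
  else
    match (List.range 128).filter (fun v => !(adj v).isEmpty) with
    | [] => true
    | i :: _ =>
        let radj := radjB es
        let fwd := closureL adj i
        let bwd := closureL radj i
        ((List.range 128).filter (fun v => !(adj v).isEmpty)).all
          (fun v => fwd.getD v false && bwd.getD v false)

-- ===== PRECONDITION & SPEC =====
-- Pre_ excludes lists containing an empty word: there Python's ord(s[0]) raises IndexError.
def Pre_checkArrangement (words : List String) : Prop := ∀ s ∈ words, s ≠ ""
instance (words : List String) : Decidable (Pre_checkArrangement words) := by
  unfold Pre_checkArrangement; infer_instance

def pvWitness_checkArrangement : List String := ["ab", "ba"]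

def Spec_checkArrangement (words : List String) (out : Bool) : Prop := out = checkArrangement_alt words
instance (words : List String) (out : Bool) : Decidable (Spec_checkArrangement words out) := by unfold Spec_checkArrangement; infer_instance

-- ===== CLAIM (what is proved, stated in full; the proofs are below) =====
def Claim_equal_checkArrangement : Prop := ∀ (words : List String), Dom_checkArrangement words → Pre_checkArrangement words → Spec_checkArrangement words (checkArrangement words)

-- ===== LEMMAS AND PROOFS =====

-- reachability relation of an adjacency function
def RelG (g : Nat → List Nat) (a b : Nat) : Prop := b ∈ g a
def ReachG (g : Nat → List Nat) : Nat → Nat → Prop := Relation.ReflTransGen (RelG g)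

-- number of unmarked vertices (the DFS fuel measure)
def unm (d : Nat → Bool) : Nat := (List.range 128).countP (fun x => !(d x))

theorem unm_le : ∀ d, unm d ≤ 128 := by
  intro d
  have h := List.countP_le_length (l := List.range 128) (p := fun x => !(d x))
  simpa [unm] using h

theorem unm_mono {d d' : Nat → Bool} (h : ∀ x, d x = true → d' x = true) : unm d' ≤ unm d := by
  refine List.countP_mono_left ?_
  intro a _ ha
  simp only [Bool.not_eq_true'] at ha ⊢
  cases hda : d a with
  | false => rfl
  | true => exact absurd (h a hda) (by simp [ha])

theorem countP_upd_aux (d : Nat → Bool) (v : Nat) (hd : d v = false) :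
    ∀ l : List Nat, v ∈ l → l.Nodup →
      l.countP (fun x => !(upd d v x)) + 1 = l.countP (fun x => !(d x)) := by
  intro l
  induction l with
  | nil => intro h; exact absurd h (by simp)
  | cons a t ih =>
    intro hmem hnd
    rcases List.nodup_cons.mp hnd with ⟨hna, hndt⟩
    by_cases hav : a = v
    · subst hav
      simp only [List.countP_cons, upd, hd]
      have ht : t.countP (fun x => !decide (x = a) && !(d x)) = t.countP (fun x => !(d x)) := by
        apply List.countP_congr
        intro x hx
        have hxa : x ≠ a := fun h => hna (h ▸ hx)
        simp [hxa]
      simp [ht]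
    · have hvt : v ∈ t := by
        rcases List.mem_cons.mp hmem with h | h
        · exact absurd h.symm hav
        · exact h
      have := ih hvt hndt
      simp only [List.countP_cons]
      have ha : (!(upd d v a)) = (!(d a)) := by simp [upd, hav]
      rw [ha]
      omega

theorem unm_upd {d : Nat → Bool} {v : Nat} (hv : v < 128) (hd : d v = false) :
    unm (upd d v) + 1 = unm d := by
  exact countP_upd_aux d v hd (List.range 128) (List.mem_range.mpr hv) (List.nodup_range)

theorem unm_pos {d : Nat → Bool} {v : Nat} (hv : v < 128) (hd : d v = false) : 1 ≤ unm d := by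
  exact List.countP_pos_iff.mpr ⟨v, List.mem_range.mpr hv, by simp [hd]⟩

-- ---- DFS lemmas (A side) ----
theorem dfsLA_cons (g : Nat → List Nat) (fuel : Nat) (u : Nat) (rest : List Nat)
    (d : Nat → Bool) :
    dfsLA g fuel (u :: rest) d = dfsLA g fuel rest (if d u then d else dfsA g fuel u d) := by
  simp [dfsLA]

theorem dfsLA_nil (g : Nat → List Nat) (fuel : Nat) (d : Nat → Bool) :
    dfsLA g fuel [] d = d := by
  simp [dfsLA]

theorem dfsA_succ (g : Nat → List Nat) (fuel : Nat) (v : Nat) (d : Nat → Bool) :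
    dfsA g (fuel + 1) v d = dfsLA g fuel (g v) (upd d v) := by
  simp [dfsA]

theorem dfsLA_mono_of (g : Nat → List Nat) (fuel : Nat)
    (hA : ∀ v d x, d x = true → dfsA g fuel v d x = true) :
    ∀ l d x, d x = true → dfsLA g fuel l d x = true := by
  intro l
  induction l with
  | nil => intro d x h; rw [dfsLA_nil]; exact h
  | cons u rest ih =>
    intro d x h
    rw [dfsLA_cons]
    apply ih
    by_cases hu : d u = true
    · simp [hu, h]
    · simp only [hu, if_neg Bool.false_ne_true, Bool.not_eq_true] at *
      simp [hA u d x h]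

theorem dfs_mono (g : Nat → List Nat) :
    ∀ fuel, (∀ v d x, d x = true → dfsA g fuel v d x = true) ∧
            (∀ l d x, d x = true → dfsLA g fuel l d x = true) := by
  intro fuel
  induction fuel with
  | zero =>
    have hA : ∀ v d x, d x = true → dfsA g 0 v d x = true := by
      intro v d x h; simpa [dfsA] using h
    exact ⟨hA, dfsLA_mono_of g 0 hA⟩
  | succ n ihn =>
    have hA : ∀ v d x, d x = true → dfsA g (n + 1) v d x = true := by
      intro v d x h
      rw [dfsA_succ]
      exact dfsLA_mono_of g n ihn.1 (g v) (upd d v) x (by simp [upd, h])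
    exact ⟨hA, dfsLA_mono_of g (n + 1) hA⟩

theorem dfsA_marks (g : Nat → List Nat) {fuel : Nat} (h : 1 ≤ fuel) (v : Nat) (d : Nat → Bool) :
    dfsA g fuel v d v = true := by
  match fuel, h with
  | n + 1, _ =>
    rw [dfsA_succ]
    exact (dfs_mono g n).2 (g v) (upd d v) v (by simp [upd])

theorem dfsLA_sub_of (g : Nat → List Nat) (fuel : Nat)
    (hA : ∀ v d x, dfsA g fuel v d x = true → d x = true ∨ ReachG g v x) :
    ∀ l d x, dfsLA g fuel l d x = true → d x = true ∨ ∃ u ∈ l, ReachG g u x := by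
  intro l
  induction l with
  | nil => intro d x h; rw [dfsLA_nil] at h; exact Or.inl h
  | cons u rest ih =>
    intro d x h
    rw [dfsLA_cons] at h
    rcases ih _ x h with h1 | ⟨u', hu', hr⟩
    · by_cases hu : d u = true
      · rw [if_pos hu] at h1
        exact Or.inl h1
      · simp only [hu, if_neg Bool.false_ne_true] at h1
        rcases hA u d x h1 with h2 | h2
        · exact Or.inl h2
        · exact Or.inr ⟨u, List.mem_cons_self .., h2⟩
    · exact Or.inr ⟨u', List.mem_cons_of_mem _ hu', hr⟩

theorem dfs_sub (g : Nat → List Nat) :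
    ∀ fuel, (∀ v d x, dfsA g fuel v d x = true → d x = true ∨ ReachG g v x) ∧
            (∀ l d x, dfsLA g fuel l d x = true → d x = true ∨ ∃ u ∈ l, ReachG g u x) := by
  intro fuel
  induction fuel with
  | zero =>
    have hA : ∀ v d x, dfsA g 0 v d x = true → d x = true ∨ ReachG g v x := by
      intro v d x h; simp only [dfsA] at h; exact Or.inl h
    exact ⟨hA, dfsLA_sub_of g 0 hA⟩
  | succ n ihn =>
    have hA : ∀ v d x, dfsA g (n + 1) v d x = true → d x = true ∨ ReachG g v x := by
      intro v d x h
      rw [dfsA_succ] at h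
      rcases dfsLA_sub_of g n ihn.1 (g v) (upd d v) x h with h1 | ⟨u, hu, hr⟩
      · by_cases hxv : x = v
        · exact Or.inr (hxv ▸ Relation.ReflTransGen.refl)
        · simp only [upd, if_neg hxv] at h1
          exact Or.inl h1
      · exact Or.inr (Relation.ReflTransGen.head hu hr)
    exact ⟨hA, dfsLA_sub_of g (n + 1) hA⟩

theorem dfsL_neighbors (g : Nat → List Nat) {fuel : Nat} (h : 1 ≤ fuel) :
    ∀ l d u, u ∈ l → dfsLA g fuel l d u = true := by
  intro l
  induction l with
  | nil => intro d u hu; exact absurd hu (by simp)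
  | cons u' rest ih =>
    intro d u hu
    rw [dfsLA_cons]
    rcases List.mem_cons.mp hu with rfl | hmem
    · apply (dfs_mono g fuel).2
      by_cases hd : d u = true
      · simp [hd]
      · simp only [hd, if_neg Bool.false_ne_true]
        exact dfsA_marks g h u d
    · exact ih _ u hmem

theorem dfsLA_closed_of (g : Nat → List Nat) (fuel : Nat)
    (hA : ∀ v d, v < 128 → d v = false → unm d + 1 ≤ fuel →
      ∀ a, dfsA g fuel v d a = true → d a = true ∨ ∀ u ∈ g a, dfsA g fuel v d u = true) :
    ∀ l d, (∀ u ∈ l, u < 128) → unm d + 1 ≤ fuel →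
      ∀ a, dfsLA g fuel l d a = true → d a = true ∨ ∀ u ∈ g a, dfsLA g fuel l d u = true := by
  intro l
  induction l with
  | nil =>
    intro d _ _ a h
    rw [dfsLA_nil] at h
    exact Or.inl h
  | cons u rest ih =>
    intro d hl hf a h
    rw [dfsLA_cons] at h
    rw [show (∀ u' ∈ g a, dfsLA g fuel (u :: rest) d u' = true) =
        (∀ u' ∈ g a, dfsLA g fuel rest (if d u then d else dfsA g fuel u d) u' = true) from by
      rw [dfsLA_cons]]
    set d' := if d u then d else dfsA g fuel u d with hd'
    have hmono : ∀ x, d x = true → d' x = true := by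
      intro x hx
      by_cases hu : d u = true
      · simpa [hd', hu] using hx
      · simp only [hd', hu, if_neg Bool.false_ne_true]
        exact (dfs_mono g fuel).1 u d x hx
    have hf' : unm d' + 1 ≤ fuel := by
      have := unm_mono hmono
      omega
    rcases ih d' (fun w hw => hl w (List.mem_cons_of_mem _ hw)) hf' a h with h1 | h2
    · by_cases hu : d u = true
      · rw [hd', if_pos hu] at h1
        exact Or.inl h1
      · rw [hd', if_neg hu] at h1
        have hdu : d u = false := by simpa using hu
        rcases hA u d (hl u (List.mem_cons_self ..)) hdu hf a h1 with h3 | h4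
        · exact Or.inl h3
        · refine Or.inr fun w hw => ?_
          have hw' : d' w = true := by rw [hd', if_neg hu]; exact h4 w hw
          exact (dfs_mono g fuel).2 rest d' w hw'
    · exact Or.inr h2

theorem dfs_closed (g : Nat → List Nat) (Hg : ∀ v x, x ∈ g v → x < 128) :
    ∀ fuel,
      (∀ v d, v < 128 → d v = false → unm d + 1 ≤ fuel →
        ∀ a, dfsA g fuel v d a = true → d a = true ∨ ∀ u ∈ g a, dfsA g fuel v d u = true) ∧
      (∀ l d, (∀ u ∈ l, u < 128) → unm d + 1 ≤ fuel →
        ∀ a, dfsLA g fuel l d a = true → d a = true ∨ ∀ u ∈ g a, dfsLA g fuel l d u = true) := by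
  intro fuel
  induction fuel with
  | zero =>
    have hA : ∀ v d, v < 128 → d v = false → unm d + 1 ≤ 0 →
        ∀ a, dfsA g 0 v d a = true → d a = true ∨ ∀ u ∈ g a, dfsA g 0 v d u = true := by
      intro v d _ _ hf; omega
    exact ⟨hA, dfsLA_closed_of g 0 hA⟩
  | succ n ihn =>
    have hA : ∀ v d, v < 128 → d v = false → unm d + 1 ≤ n + 1 →
        ∀ a, dfsA g (n + 1) v d a = true → d a = true ∨ ∀ u ∈ g a, dfsA g (n + 1) v d u = true := by
      intro v d hv hdv hf a h
      rw [dfsA_succ] at h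
      rw [show (∀ u ∈ g a, dfsA g (n + 1) v d u = true) =
          (∀ u ∈ g a, dfsLA g n (g v) (upd d v) u = true) from by rw [dfsA_succ]]
      have hupd : unm (upd d v) + 1 = unm d := unm_upd hv hdv
      have hfn : unm (upd d v) + 1 ≤ n := by omega
      rcases dfsLA_closed_of g n ihn.1 (g v) (upd d v) (fun u hu => Hg v u hu) hfn a h with h1 | h2
      · by_cases hav : a = v
        · subst hav
          refine Or.inr fun w hw => ?_
          have hn1 : 1 ≤ n := by
            have := unm_pos hv hdv
            omega
          exact dfsL_neighbors g hn1 (g a) (upd d a) w hw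
        · simp only [upd, if_neg hav] at h1
          exact Or.inl h1
      · exact Or.inr h2
    exact ⟨hA, dfsLA_closed_of g (n + 1) hA⟩

theorem dfs_reach_iff (g : Nat → List Nat) (Hg : ∀ v x, x ∈ g v → x < 128)
    {i : Nat} (hi : i < 128) (x : Nat) :
    dfsA g 129 i (fun _ => false) x = true ↔ ReachG g i x := by
  constructor
  · intro h
    rcases (dfs_sub g 129).1 i (fun _ => false) x h with h1 | h1
    · exact absurd h1 (by simp)
    · exact h1
  · intro hr
    induction hr with
    | refl => exact dfsA_marks g (by omega) i (fun _ => false)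
    | tail _ hbc ih =>
      have hf : unm (fun _ => false) + 1 ≤ 129 := by
        have := unm_le (fun _ => false)
        omega
      rcases (dfs_closed g Hg 129).1 i (fun _ => false) hi rfl hf _ ih with h | h
      · exact absurd h (by simp)
      · exact h _ hbc

-- ---- BFS lemmas (B side): a function-level model of the closure loop ----
def markB (l : List Nat) (d : Nat → Bool) : Nat → Bool :=
  l.foldl (fun a u => upd a u) d

def stepB (g : Nat → List Nat) (s : Nat → Bool) : Nat → Bool :=
  (List.range 128).foldl (fun acc v => if s v then markB (g v) acc else acc) s

def iterB (g : Nat → List Nat) : Nat → (Nat → Bool) → (Nat → Bool)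
  | 0, s => s
  | n+1, s => iterB g n (stepB g s)

def closureB (g : Nat → List Nat) (start : Nat) : Nat → Bool :=
  iterB g 128 (fun x => if x = start then true else false)

theorem markB_spec (l : List Nat) (d : Nat → Bool) (x : Nat) :
    markB l d x = true ↔ d x = true ∨ x ∈ l := by
  induction l generalizing d with
  | nil => simp [markB]
  | cons u rest ih =>
    show markB rest (upd d u) x = true ↔ _
    rw [ih]
    by_cases hx : x = u
    · simp [upd, hx]
    · simp only [upd, if_neg hx]
      rw [List.mem_cons]
      tauto

theorem stepB_aux (g : Nat → List Nat) (s : Nat → Bool) (x : Nat) :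
    ∀ (L : List Nat) (acc : Nat → Bool),
      (L.foldl (fun acc v => if s v then markB (g v) acc else acc) acc) x = true ↔
        acc x = true ∨ ∃ v ∈ L, s v = true ∧ x ∈ g v := by
  intro L
  induction L with
  | nil => intro acc; simp
  | cons v t ih =>
    intro acc
    rw [List.foldl_cons, ih]
    by_cases hv : s v = true
    · rw [if_pos hv, markB_spec]
      constructor
      · rintro ((h | h) | h)
        · exact Or.inl h
        · exact Or.inr ⟨v, List.mem_cons_self .., hv, h⟩
        · rcases h with ⟨w, hw, h1, h2⟩
          exact Or.inr ⟨w, List.mem_cons_of_mem _ hw, h1, h2⟩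
      · rintro (h | ⟨w, hw, h1, h2⟩)
        · exact Or.inl (Or.inl h)
        · rcases List.mem_cons.mp hw with rfl | hw'
          · exact Or.inl (Or.inr h2)
          · exact Or.inr ⟨w, hw', h1, h2⟩
    · rw [if_neg hv]
      constructor
      · rintro (h | ⟨w, hw, h1, h2⟩)
        · exact Or.inl h
        · exact Or.inr ⟨w, List.mem_cons_of_mem _ hw, h1, h2⟩
      · rintro (h | ⟨w, hw, h1, h2⟩)
        · exact Or.inl h
        · rcases List.mem_cons.mp hw with rfl | hw'
          · exact absurd h1 hv
          · exact Or.inr ⟨w, hw', h1, h2⟩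

theorem stepB_spec (g : Nat → List Nat) (s : Nat → Bool) (x : Nat) :
    stepB g s x = true ↔ s x = true ∨ ∃ v, v < 128 ∧ s v = true ∧ x ∈ g v := by
  unfold stepB
  rw [stepB_aux]
  simp [List.mem_range]

theorem stepB_superset (g : Nat → List Nat) (s : Nat → Bool) (x : Nat) (h : s x = true) :
    stepB g s x = true := (stepB_spec g s x).mpr (Or.inl h)

theorem iterB_add (g : Nat → List Nat) (n m : Nat) (s : Nat → Bool) :
    iterB g (n + m) s = iterB g m (iterB g n s) := by
  induction n generalizing s with
  | zero => simp [iterB]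
  | succ k ih =>
    have h1 : k + 1 + m = (k + m) + 1 := by omega
    rw [h1]
    show iterB g (k + m) (stepB g s) = iterB g m (iterB g k (stepB g s))
    exact ih (stepB g s)

theorem iterB_superset (g : Nat → List Nat) :
    ∀ (n : Nat) (s : Nat → Bool) (x : Nat), s x = true → iterB g n s x = true := by
  intro n
  induction n with
  | zero => intro s x h; exact h
  | succ k ih => intro s x h; exact ih (stepB g s) x (stepB_superset g s x h)

theorem iterB_inv (g : Nat → List Nat) (P : Nat → Prop)
    (hstep : ∀ (s : Nat → Bool), (∀ x, s x = true → P x) →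
      ∀ x, stepB g s x = true → P x) :
    ∀ (n : Nat) (s : Nat → Bool), (∀ x, s x = true → P x) →
      ∀ x, iterB g n s x = true → P x := by
  intro n
  induction n with
  | zero => intro s hs x h; exact hs x h
  | succ k ih => intro s hs x h; exact ih (stepB g s) (hstep s hs) x h

-- the number of marked vertices below 128
def cmk (s : Nat → Bool) : Nat := ((Finset.range 128).filter (fun x => s x = true)).card

theorem cmk_strict (g : Nat → List Nat) (Hg : ∀ v x, x ∈ g v → x < 128)
    {s : Nat → Bool} (hne : stepB g s ≠ s) : cmk s + 1 ≤ cmk (stepB g s) := by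
  have hx : ∃ x, stepB g s x ≠ s x := by
    by_contra h
    exact hne (funext fun x => by by_contra hx; exact h ⟨x, hx⟩)
  rcases hx with ⟨x, hx⟩
  have hsx : s x = false := by
    cases h : s x with
    | false => rfl
    | true =>
      have h2 := stepB_superset g s x h
      rw [h2, h] at hx
      exact absurd rfl hx
  have hstx : stepB g s x = true := by
    cases h : stepB g s x with
    | true => rfl
    | false => rw [h, hsx] at hx; exact absurd rfl hx
  have hx128 : x < 128 := by
    rcases (stepB_spec g s x).mp hstx with h | ⟨v, _, _, hxg⟩
    · rw [h] at hsx; exact absurd hsx (by simp)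
    · exact Hg v x hxg
  have hss : (Finset.range 128).filter (fun y => s y = true) ⊂
      (Finset.range 128).filter (fun y => stepB g s y = true) := by
    constructor
    · intro y hy
      rcases Finset.mem_filter.mp hy with ⟨h1, h2⟩
      exact Finset.mem_filter.mpr ⟨h1, stepB_superset g s y h2⟩
    · intro hsub
      have := Finset.mem_filter.mp
        (hsub (Finset.mem_filter.mpr ⟨Finset.mem_range.mpr hx128, hstx⟩))
      rw [this.2] at hsx
      exact absurd hsx (by simp)
  have := Finset.card_lt_card hss
  unfold cmk
  omega

theorem cmk_le (s : Nat → Bool) : cmk s ≤ 128 := by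
  have := Finset.card_filter_le (Finset.range 128) (fun x => s x = true)
  simpa [cmk] using this

def startB (i : Nat) : Nat → Bool := fun x => if x = i then true else false

theorem iterB_succ_out (g : Nat → List Nat) (n : Nat) (s : Nat → Bool) :
    iterB g (n + 1) s = stepB g (iterB g n s) := by
  rw [iterB_add g n 1 s]
  show iterB g 0 (stepB g (iterB g n s)) = _
  rfl

theorem iterB_propagate (g : Nat → List Nat) {s : Nat → Bool} {k : Nat}
    (h : stepB g (iterB g k s) = iterB g k s) :
    ∀ m, iterB g (k + m) s = iterB g k s := by
  intro m
  induction m with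
  | zero => rfl
  | succ j ih =>
    rw [show k + (j + 1) = (k + j) + 1 from by omega, iterB_succ_out, ih, h]

set_option maxRecDepth 4096 in
theorem closure_fix (g : Nat → List Nat) (Hg : ∀ v x, x ∈ g v → x < 128) (i : Nat) :
    stepB g (iterB g 128 (startB i)) = iterB g 128 (startB i) := by
  by_contra hne
  have hall : ∀ k, k ≤ 128 → stepB g (iterB g k (startB i)) ≠ iterB g k (startB i) := by
    intro k hk hfix
    have h128 : iterB g 128 (startB i) = iterB g k (startB i) := by
      have := iterB_propagate g hfix (128 - k)
      rwa [show k + (128 - k) = 128 from by omega] at this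
    rw [h128, hfix] at hne
    exact hne rfl
  have hgrow : ∀ n, n ≤ 128 → n ≤ cmk (iterB g n (startB i)) := by
    intro n
    induction n with
    | zero => intro _; omega
    | succ k ih =>
      intro hk
      have h1 : k ≤ cmk (iterB g k (startB i)) := ih (by omega)
      have h2 := cmk_strict g Hg (hall k (by omega))
      rw [iterB_succ_out]
      omega
  have h1 := hgrow 128 (by omega)
  have h2 := cmk_strict g Hg (hall 128 (by omega))
  have h3 := cmk_le (stepB g (iterB g 128 (startB i)))
  omega

theorem closure_reach_iff (g : Nat → List Nat) (Hg : ∀ v x, x ∈ g v → x < 128)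
    {i : Nat} (hi : i < 128) (x : Nat) :
    closureB g i x = true ↔ ReachG g i x := by
  have hstart : closureB g i = iterB g 128 (startB i) := rfl
  constructor
  · intro h
    refine iterB_inv g (ReachG g i) ?_ 128 (startB i) ?_ x h
    · intro s hs y hy
      rcases (stepB_spec g s y).mp hy with h1 | ⟨v, _, hv, hyg⟩
      · exact hs y h1
      · exact Relation.ReflTransGen.tail (hs v hv) hyg
    · intro y hy
      have : y = i := by
        by_contra hne
        simp [startB, hne] at hy
      exact this ▸ Relation.ReflTransGen.refl
  · intro hr
    have hfix := closure_fix g Hg i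
    have hlt : ∀ y, iterB g 128 (startB i) y = true → y < 128 := by
      refine iterB_inv g (fun y => y < 128) ?_ 128 (startB i) ?_
      · intro s hs y hy
        rcases (stepB_spec g s y).mp hy with h1 | ⟨v, _, _, hyg⟩
        · exact hs y h1
        · exact Hg v y hyg
      · intro y hy
        have : y = i := by
          by_contra hne
          simp [startB, hne] at hy
        omega
    show iterB g 128 (startB i) x = true
    induction hr with
    | refl => exact iterB_superset g 128 (startB i) i (by simp [startB])
    | tail hab hbc ih =>
      rename_i b c
      have hb : iterB g 128 (startB i) b = true := ih
      have : stepB g (iterB g 128 (startB i)) c = true :=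
        (stepB_spec g _ c).mpr (Or.inr ⟨b, hlt b hb, hb, hbc⟩)
      rwa [hfix] at this

-- ---- bridge: the list-based seen array of the port computes the function-level model ----
theorem length_markL (l : List Nat) : ∀ (d : List Bool), (markL l d).length = d.length := by
  induction l with
  | nil => intro d; rfl
  | cons u t ih =>
    intro d
    show (markL t (d.set u true)).length = _
    rw [ih, List.length_set]

theorem length_stepL (g : Nat → List Nat) (s : List Bool) :
    (stepL g s).length = s.length := by
  have haux : ∀ (L : List Nat) (acc : List Bool),
      (L.foldl (fun acc v => if s.getD v false then markL (g v) acc else acc) acc).length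
        = acc.length := by
    intro L
    induction L with
    | nil => intro acc; rfl
    | cons v t ih =>
      intro acc
      rw [List.foldl_cons, ih]
      by_cases hv : s.getD v false = true
      · rw [if_pos hv, length_markL]
      · rw [if_neg hv]
  exact haux (List.range 128) s

theorem markL_getD (l : List Nat) :
    ∀ (d : List Bool), (∀ u ∈ l, u < d.length) → ∀ x,
      ((markL l d).getD x false = true ↔ d.getD x false = true ∨ x ∈ l) := by
  induction l with
  | nil => intro d _ x; simp [markL]
  | cons u t ih =>
    intro d hl x
    show (markL t (d.set u true)).getD x false = true ↔ _
    rw [ih (d.set u true)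
      (fun w hw => by rw [List.length_set]; exact hl w (List.mem_cons_of_mem _ hw))]
    have hu : u < d.length := hl u (List.mem_cons_self ..)
    by_cases hx : x = u
    · subst hx
      simp [List.getD, hu]
    · have : (d.set u true).getD x false = d.getD x false := by
        simp [List.getD, (Ne.symm hx : ¬ u = x)]
      rw [this, List.mem_cons]
      tauto

theorem stepL_eq_stepB (g : Nat → List Nat) (Hg : ∀ v x, x ∈ g v → x < 128)
    (s : List Bool) (hs : s.length = 128) (x : Nat) :
    (stepL g s).getD x false = stepB g (fun y => s.getD y false) x := by
  apply Bool.coe_iff_coe.mp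
  rw [stepB_spec]
  show (((List.range 128).foldl
      (fun acc v => if s.getD v false then markL (g v) acc else acc) s).getD x false = true) ↔ _
  have haux : ∀ (L : List Nat) (acc : List Bool), acc.length = 128 →
      ((L.foldl (fun acc v => if s.getD v false then markL (g v) acc else acc) acc).getD x false = true
        ↔ acc.getD x false = true ∨ ∃ v ∈ L, s.getD v false = true ∧ x ∈ g v) := by
    intro L
    induction L with
    | nil => intro acc _; simp
    | cons v t iht =>
      intro acc hacc
      rw [List.foldl_cons]
      by_cases hv : s.getD v false = true
      · rw [if_pos hv, iht (markL (g v) acc) (by rw [length_markL, hacc]),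
          markL_getD (g v) acc (fun w hw => by rw [hacc]; exact Hg v w hw)]
        constructor
        · rintro ((h | h) | ⟨w, hw, h1, h2⟩)
          · exact Or.inl h
          · exact Or.inr ⟨v, List.mem_cons_self .., hv, h⟩
          · exact Or.inr ⟨w, List.mem_cons_of_mem _ hw, h1, h2⟩
        · rintro (h | ⟨w, hw, h1, h2⟩)
          · exact Or.inl (Or.inl h)
          · rcases List.mem_cons.mp hw with rfl | hw'
            · exact Or.inl (Or.inr h2)
            · exact Or.inr ⟨w, hw', h1, h2⟩
      · rw [if_neg hv, iht acc hacc]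
        constructor
        · rintro (h | ⟨w, hw, h1, h2⟩)
          · exact Or.inl h
          · exact Or.inr ⟨w, List.mem_cons_of_mem _ hw, h1, h2⟩
        · rintro (h | ⟨w, hw, h1, h2⟩)
          · exact Or.inl h
          · rcases List.mem_cons.mp hw with rfl | hw'
            · exact absurd h1 hv
            · exact Or.inr ⟨w, hw', h1, h2⟩
  rw [haux (List.range 128) s hs]
  simp [List.mem_range]

theorem iterL_eq_iterB (g : Nat → List Nat) (Hg : ∀ v x, x ∈ g v → x < 128) :
    ∀ (n : Nat) (s : List Bool), s.length = 128 →
      ∀ x, (iterL g n s).getD x false = iterB g n (fun y => s.getD y false) x := by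
  intro n
  induction n with
  | zero => intro s _ x; rfl
  | succ k ih =>
    intro s hs x
    show (iterL g k (stepL g s)).getD x false = iterB g k (stepB g (fun y => s.getD y false)) x
    rw [ih (stepL g s) (by rw [length_stepL, hs]) x]
    congr 1
    funext y
    exact stepL_eq_stepB g Hg s hs y

theorem closureL_eq (g : Nat → List Nat) (Hg : ∀ v x, x ∈ g v → x < 128)
    {i : Nat} (hi : i < 128) (x : Nat) :
    (closureL g i).getD x false = closureB g i x := by
  show (iterL g 128 ((List.replicate 128 false).set i true)).getD x false = _
  rw [iterL_eq_iterB g Hg 128 ((List.replicate 128 false).set i true)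
    (by rw [List.length_set, List.length_replicate]) x]
  show iterB g 128 _ x = iterB g 128 _ x
  congr 1
  funext y
  by_cases hy : y = i
  · subst hy
    simp [List.getD, hi]
  · rw [if_neg hy, List.getD_eq_getElem?_getD, List.getElem?_set, if_neg (Ne.symm hy),
      List.getElem?_replicate]
    rcases Nat.lt_or_ge y 128 with h | h
    · rw [if_pos h]
      rfl
    · rw [if_neg (by omega)]
      rfl

-- ---- graph-structure lemmas ----
theorem foldl_pair_split {α β γ : Type} (f : α → γ → α) (h : β → γ → β) :
    ∀ (l : List γ) (a : α) (b : β),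
      l.foldl (fun p s => (f p.1 s, h p.2 s)) (a, b) = (l.foldl f a, l.foldl h b) := by
  intro l
  induction l with
  | nil => intro a b; rfl
  | cons c t ih => intro a b; exact ih (f a c) (h b c)

theorem buildA_eq (words : List String) :
    buildA words = (adjB (edgesB words), indegB (edgesB words)) := by
  unfold buildA adjB indegB edgesB
  rw [List.foldl_map, List.foldl_map]
  exact foldl_pair_split
    (fun a s => fun x => if x = ordAt s 0 then a x ++ [ordAt s (-1)] else a x)
    (fun b s => fun x => if x = ordAt s (-1) then b x + 1 else b x)
    words (fun _ => []) (fun _ => 0)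

theorem adjB_mem_aux (v x : Nat) :
    ∀ (es : List (Nat × Nat)) (a : Nat → List Nat),
      x ∈ es.foldl (fun a e => fun x => if x = e.1 then a x ++ [e.2] else a x) a v ↔
        x ∈ a v ∨ (v, x) ∈ es := by
  intro es
  induction es with
  | nil => intro a; simp
  | cons e t ih =>
    intro a
    rw [List.foldl_cons, ih]
    by_cases hv : v = e.1 <;> simp [hv, Prod.ext_iff] <;> tauto

theorem adjB_mem (es : List (Nat × Nat)) (v x : Nat) :
    x ∈ adjB es v ↔ (v, x) ∈ es := by
  unfold adjB; rw [adjB_mem_aux]; simp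

theorem radjB_mem_aux (v x : Nat) :
    ∀ (es : List (Nat × Nat)) (a : Nat → List Nat),
      x ∈ es.foldl (fun a e => fun x => if x = e.2 then a x ++ [e.1] else a x) a v ↔
        x ∈ a v ∨ (x, v) ∈ es := by
  intro es
  induction es with
  | nil => intro a; simp
  | cons e t ih =>
    intro a
    rw [List.foldl_cons, ih]
    by_cases hv : v = e.2 <;> simp [hv, Prod.ext_iff] <;> tauto

theorem radjB_mem (es : List (Nat × Nat)) (v x : Nat) :
    x ∈ radjB es v ↔ (x, v) ∈ es := by
  unfold radjB; rw [radjB_mem_aux]; simp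

theorem indegB_aux (v : Nat) :
    ∀ (es : List (Nat × Nat)) (a : Nat → Nat),
      es.foldl (fun a e => fun x => if x = e.2 then a x + 1 else a x) a v =
        a v + es.countP (fun e => e.2 = v) := by
  intro es
  induction es with
  | nil => intro a; simp
  | cons e t ih =>
    intro a
    rw [List.foldl_cons, ih, List.countP_cons]
    by_cases hv : v = e.2 <;> simp [hv, eq_comm] <;> omega

theorem indegB_eq_countP (es : List (Nat × Nat)) (v : Nat) :
    indegB es v = es.countP (fun e => e.2 = v) := by
  unfold indegB; rw [indegB_aux]; omega

theorem transposeA_inner_mem (u v x : Nat) :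
    ∀ (l : List Nat) (gf : Nat → List Nat),
      x ∈ l.foldl (fun g w => fun y => if y = w then g y ++ [u] else g y) gf v ↔
        x ∈ gf v ∨ (x = u ∧ v ∈ l) := by
  intro l
  induction l with
  | nil => intro gf; simp
  | cons w t ih =>
    intro gf
    rw [List.foldl_cons, ih]
    by_cases hv : v = w <;> simp [hv] <;> tauto

theorem transposeA_outer_mem (adj : Nat → List Nat) (v x : Nat) :
    ∀ (L : List Nat) (g0 : Nat → List Nat),
      x ∈ L.foldl
          (fun g u => (adj u).foldl (fun g w => fun y => if y = w then g y ++ [u] else g y) g)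
          g0 v ↔
        x ∈ g0 v ∨ (x ∈ L ∧ v ∈ adj x) := by
  intro L
  induction L with
  | nil => intro g0; simp
  | cons u t ih =>
    intro g0
    rw [List.foldl_cons, ih, transposeA_inner_mem]
    constructor
    · rintro ((h | ⟨rfl, h2⟩) | ⟨h1, h2⟩)
      · exact Or.inl h
      · exact Or.inr ⟨List.mem_cons_self .., h2⟩
      · exact Or.inr ⟨List.mem_cons_of_mem _ h1, h2⟩
    · rintro (h | ⟨h1, h2⟩)
      · exact Or.inl (Or.inl h)
      · rcases List.mem_cons.mp h1 with rfl | h1'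
        · exact Or.inl (Or.inr ⟨rfl, h2⟩)
        · exact Or.inr ⟨h1', h2⟩

theorem transposeA_mem (adj : Nat → List Nat) (v x : Nat) :
    x ∈ transposeA adj v ↔ x < 128 ∧ v ∈ adj x := by
  unfold transposeA
  rw [transposeA_outer_mem]
  simp [List.mem_range]

theorem ordAt_lt {s : String} (hs : pvDomStr s = true) (i : Int) : ordAt s i < 128 := by
  unfold ordAt
  cases hg : PySem.Str.pyGet? s i with
  | none => simp
  | some c =>
    have hc : c ∈ s.toList := by
      simp only [PySem.Str.pyGet?, PySem.Chars.pyGet?, PySem.List.pyGet?] at hg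
      rcases Option.bind_eq_some_iff.mp hg with ⟨k, _, hk⟩
      exact List.mem_of_getElem? hk
    have := List.all_eq_true.mp hs c hc
    simp only [pvDomChar, Bool.or_eq_true, Bool.and_eq_true, beq_iff_eq,
      decide_eq_true_eq] at this
    simp only [Option.getD_some]
    omega

theorem edgesB_lt (words : List String) (hD : Dom_checkArrangement words) :
    ∀ e ∈ edgesB words, e.1 < 128 ∧ e.2 < 128 := by
  intro e he
  rcases List.mem_map.mp he with ⟨s, hs, rfl⟩
  have hdom : pvDomStr s = true := List.all_eq_true.mp hD s hs
  exact ⟨ordAt_lt hdom 0, ordAt_lt hdom (-1)⟩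

theorem check_eq (words : List String) (hD : Dom_checkArrangement words) :
    checkArrangement words = checkArrangement_alt words := by
  have hE := edgesB_lt words hD
  simp only [checkArrangement, checkArrangement_alt, buildA_eq]
  set es := edgesB words with hes
  set adj := adjB es with hadjdef
  set ind := indegB es with hinddef
  have Hadj : ∀ v x, x ∈ adj v → x < 128 := by
    intro v x hx
    exact (hE _ ((adjB_mem es v x).mp hx)).2
  have HadjT : ∀ v x, x ∈ transposeA adj v → x < 128 := by
    intro v x hx
    exact ((transposeA_mem adj v x).mp hx).1
  have HradjB : ∀ v x, x ∈ radjB es v → x < 128 := by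
    intro v x hx
    exact (hE _ ((radjB_mem es v x).mp hx)).1
  have hmemR : ∀ v x, x ∈ transposeA adj v ↔ x ∈ radjB es v := by
    intro v x
    rw [transposeA_mem, radjB_mem]
    constructor
    · rintro ⟨_, h⟩
      exact (adjB_mem es x v).mp h
    · intro h
      exact ⟨(hE _ h).1, (adjB_mem es x v).mpr h⟩
  have hReachR : ∀ a b, ReachG (transposeA adj) a b ↔ ReachG (radjB es) a b := by
    intro a b
    constructor
    · exact Relation.ReflTransGen.mono (fun a b h => (hmemR a b).mp h)
    · exact Relation.ReflTransGen.mono (fun a b h => (hmemR a b).mpr h)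
  by_cases hbalB : (List.range 128).all (fun i => (adj i).length == ind i) = true
  · -- balance holds: A takes isSCA, B takes the closure test
    have hbal : ∀ v, v < 128 → (adj v).length = ind v := by
      intro v hv
      have := List.all_eq_true.mp hbalB v (List.mem_range.mpr hv)
      simpa using this
    have hany : (List.range 128).any (fun i => !((adj i).length == ind i)) = false := by
      rw [List.any_eq_false]
      intro x hx
      simp [List.all_eq_true.mp hbalB x hx]
    rw [if_pos hbalB, if_neg (by simp [hany])]
    -- isolated-vertex equivalence under balance
    have hiso : ∀ v, v < 128 → (adj v = [] ↔ transposeA adj v = []) := by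
      intro v hv
      have hlen : (adj v).length = es.countP (fun e => e.2 = v) := by
        rw [hbal v hv, hinddef]
        exact indegB_eq_countP es v
      constructor
      · intro h0
        rw [List.eq_nil_iff_forall_not_mem]
        intro x hx
        rcases (transposeA_mem adj v x).mp hx with ⟨hx128, hvx⟩
        have hmem : (x, v) ∈ es := (adjB_mem es x v).mp hvx
        have : es.countP (fun e => e.2 = v) = 0 := by
          rw [← hlen, h0]
          rfl
        have := List.countP_eq_zero.mp this _ hmem
        simp at this
      · intro h0
        have hcnt : es.countP (fun e => e.2 = v) = 0 := by
          rw [List.countP_eq_zero]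
          intro e he hev
          have hev' : e.2 = v := by simpa using hev
          have hxv : (e.1, v) ∈ es := by
            have : e = (e.1, e.2) := rfl
            rw [this, hev'] at he
            exact he
          have : e.1 ∈ transposeA adj v := by
            rw [transposeA_mem]
            exact ⟨(hE _ hxv).1, (adjB_mem es e.1 v).mpr hxv⟩
          rw [h0] at this
          simp at this
        have : (adj v).length = 0 := by rw [hlen, hcnt]
        exact List.length_eq_zero_iff.mp this
    -- the start vertex of both programs
    cases hfl : (List.range 128).filter (fun v => !(adj v).isEmpty) with
    | nil =>
      -- no non-isolated vertex: both sides return true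
      have hfindn : (List.range 128).find? (fun v => !(adj v).isEmpty) = none := by
        rw [← List.head?_filter, hfl]
        rfl
      have hempty : ∀ v, v < 128 → adj v = [] := by
        intro v hv
        have hnm : v ∉ (List.range 128).filter (fun v => !(adj v).isEmpty) := by
          rw [hfl]; simp
        by_contra hne
        exact hnm (List.mem_filter.mpr ⟨List.mem_range.mpr hv,
          by simp [hne]⟩)
      have hd1 : isdiscA adj (fun _ => false) = true := by
        rw [isdiscA, List.all_eq_true]
        intro v hv
        simp [hempty v (List.mem_range.mp hv)]
      have hd2 : isdiscA (transposeA adj) (dfsA (transposeA adj) 129 127 fun _ => false) = true := by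
        rw [isdiscA, List.all_eq_true]
        intro v hv
        have : transposeA adj v = [] := by
          rw [List.eq_nil_iff_forall_not_mem]
          intro x hx
          rcases (transposeA_mem adj v x).mp hx with ⟨hx128, hvx⟩
          rw [hempty x hx128] at hvx
          simp at hvx
        simp [this]
      simp [isSCA, hfindn, hd1, hd2]
    | cons i tl =>
      show isSCA adj =
        ((i :: tl).all fun v => (closureL adj i).getD v false && (closureL (radjB es) i).getD v false)
      rw [← hfl]
      have hmemi : i ∈ (List.range 128).filter (fun v => !(adj v).isEmpty) := by
        rw [hfl]; exact List.mem_cons_self ..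
      have hi128 : i < 128 := List.mem_range.mp (List.mem_filter.mp hmemi).1
      have hine : ¬ adj i = [] := by
        have := (List.mem_filter.mp hmemi).2
        simpa [List.isEmpty_iff] using this
      have hfind : (List.range 128).find? (fun v => !(adj v).isEmpty) = some i := by
        rw [← List.head?_filter, hfl]
        rfl
      -- marks of the four searches agree pointwise with reachability
      have hfwd : ∀ x, dfsA adj 129 i (fun _ => false) x = (closureL adj i).getD x false := by
        intro x
        rw [closureL_eq adj Hadj hi128 x]
        apply Bool.coe_iff_coe.mp
        rw [dfs_reach_iff adj Hadj hi128, closure_reach_iff adj Hadj hi128]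
      have hbwd : ∀ x, dfsA (transposeA adj) 129 i (fun _ => false) x
          = (closureL (radjB es) i).getD x false := by
        intro x
        rw [closureL_eq (radjB es) HradjB hi128 x]
        apply Bool.coe_iff_coe.mp
        rw [dfs_reach_iff (transposeA adj) HadjT hi128,
          closure_reach_iff (radjB es) HradjB hi128, hReachR]
      simp only [isSCA, hfind]
      apply Bool.coe_iff_coe.mp
      constructor
      · intro hA
        by_cases h1 : isdiscA adj (dfsA adj 129 i fun _ => false) = true
        · rw [if_neg (by simp [h1])] at hA
          rw [List.all_eq_true]
          intro v hv
          have hv' := List.mem_filter.mp hv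
          have hv128 : v < 128 := List.mem_range.mp hv'.1
          have hvne : ¬ adj v = [] := by simpa [List.isEmpty_iff] using hv'.2
          have hfv : (closureL adj i).getD v false = true := by
            rw [← hfwd]
            have := List.all_eq_true.mp h1 v (List.mem_range.mpr hv128)
            rcases Bool.or_eq_true_iff.mp this with h | h
            · exact absurd (List.isEmpty_iff.mp h) hvne
            · exact h
          have hbv : (closureL (radjB es) i).getD v false = true := by
            rw [← hbwd]
            have := List.all_eq_true.mp hA v (List.mem_range.mpr hv128)
            rcases Bool.or_eq_true_iff.mp this with h | h
            · exact absurd ((hiso v hv128).mpr (List.isEmpty_iff.mp h)) hvne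
            · exact h
          rw [Bool.and_eq_true]
          exact ⟨hfv, hbv⟩
        · rw [if_pos (by simp [h1])] at hA
          exact absurd hA (by simp)
      · intro hB
        have hall : ∀ v, v < 128 → ¬ adj v = [] →
            (closureL adj i).getD v false = true ∧ (closureL (radjB es) i).getD v false = true := by
          intro v hv128 hvne
          have hvf : v ∈ (List.range 128).filter (fun v => !(adj v).isEmpty) := by
            exact List.mem_filter.mpr ⟨List.mem_range.mpr hv128,
              by simp [hvne]⟩
          have := List.all_eq_true.mp hB v hvf
          exact Bool.and_eq_true_iff.mp this
        have h1 : isdiscA adj (dfsA adj 129 i fun _ => false) = true := by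
          rw [isdiscA, List.all_eq_true]
          intro v hv
          have hv128 : v < 128 := List.mem_range.mp hv
          by_cases hvne : adj v = []
          · simp [hvne]
          · have := (hall v hv128 hvne).1
            rw [← hfwd] at this
            simp [this]
        rw [if_neg (by simp [h1])]
        rw [isdiscA, List.all_eq_true]
        intro v hv
        have hv128 : v < 128 := List.mem_range.mp hv
        by_cases hvne : adj v = []
        · simp [(hiso v hv128).mp hvne]
        · have := (hall v hv128 hvne).2
          rw [← hbwd] at this
          simp [this]
  · -- balance fails: both sides return false
    have hany : (List.range 128).any (fun i => !((adj i).length == ind i)) = true := by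
      rw [List.all_eq_true] at hbalB
      rw [List.any_eq_true]
      rcases Classical.not_forall.mp hbalB with ⟨x, hx⟩
      rcases Classical.not_imp.mp hx with ⟨hmem, hpx⟩
      exact ⟨x, hmem, by simpa using hpx⟩
    rw [if_neg hbalB, if_pos (by simp [hany])]

-- ===== VERDICT (by name: the statement is the Claim_ definition above) =====
theorem checkArrangement_spec : Claim_equal_checkArrangement := by
  intro words hD _
  unfold Spec_checkArrangement
  exact check_eq words hD
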